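-- pv_equiv track=rewrite | github.com/cng6sk/pythia-mia-security-lab | scripts_pack/section6_4_plot.py | order_items
-- ===== SOURCE A (Python) =====
-- from typing import Dict, List, Optional, Tuple
--
-- def order_items(items: List[str], preferred: List[str]) -> List[str]:
--     ordered: List[str] = []
--     seen = set()
--
--     for x in preferred:
--         if x in items and x not in seen:
--             ordered.append(x)
--             seen.add(x)
--
--     for x in items:
--         if x not in seen:
--             ordered.append(x)
--             seen.add(x)
--
--     return ordered
-- ===== SOURCE B (Python) =====
-- def order_items(items, preferred):
--     # Assign each name a numeric rank: first index in `preferred` if it occurs there,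
--     # otherwise len(preferred) + its position among the deduplicated items; then one
--     # stable-free sort of the deduplicated items by that (all-distinct) rank.
--     rank = {}
--     for i, x in enumerate(preferred):
--         if x not in rank:
--             rank[x] = i
--     deduped = list(dict.fromkeys(items))
--     for j, x in enumerate(deduped):
--         if x not in rank:
--             rank[x] = len(preferred) + j
--     return sorted(deduped, key=rank.__getitem__)
-- ===== Notes on version B (the rewrite author's own statement) =====
-- stated objective: faster
-- what changed: Replaces A's two append-if-unseen passes over a mutable seen-set by a rank-and-sort scheme: one dict assigns every name a distinct numeric rank (its first index in preferred, or len(preferred) plus its position among the deduplicated items), and the deduplicated items are sorted once by that rank.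
import Mathlib
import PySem

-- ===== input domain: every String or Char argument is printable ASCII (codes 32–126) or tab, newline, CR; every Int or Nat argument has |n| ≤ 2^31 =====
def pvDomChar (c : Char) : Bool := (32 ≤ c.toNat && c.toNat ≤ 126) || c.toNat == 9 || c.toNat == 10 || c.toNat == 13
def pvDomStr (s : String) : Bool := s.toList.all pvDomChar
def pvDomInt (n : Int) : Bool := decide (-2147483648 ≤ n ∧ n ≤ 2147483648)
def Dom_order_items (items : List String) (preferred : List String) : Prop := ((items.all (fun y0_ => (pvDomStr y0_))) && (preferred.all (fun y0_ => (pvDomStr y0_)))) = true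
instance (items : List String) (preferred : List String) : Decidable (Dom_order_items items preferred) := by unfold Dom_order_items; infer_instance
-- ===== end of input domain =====

-- B replaces A's two append-if-unseen passes by a rank-and-sort scheme: every name gets one
-- numeric rank (first preferred index, or len(preferred) + position among deduplicated items)
-- and the deduplicated items are sorted once by that rank (objective: alternative algorithm).

-- ===== PORT A =====
def order_items (items : List String) (preferred : List String) : List String :=
  let st1 := preferred.foldl (fun (st : List String × PySem.Set String) x =>
    if x ∈ items ∧ ¬ x ∈ st.2 then (st.1 ++ [x], PySem.Set.add st.2 x) else st)
    ([], PySem.Set.empty)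
  let st2 := items.foldl (fun (st : List String × PySem.Set String) x =>
    if ¬ x ∈ st.2 then (st.1 ++ [x], PySem.Set.add st.2 x) else st) st1
  st2.1

-- ===== PORT B =====
def order_items_alt (items : List String) (preferred : List String) : List String :=
  let rank0 := (PySem.List.enumerate preferred).foldl
    (fun (d : PySem.Dict String Int) p => if d.contains p.2 then d else d.insert p.2 p.1)
    PySem.Dict.empty
  let deduped := PySem.List.dedup items
  let rank := (PySem.List.enumerate deduped).foldl
    (fun (d : PySem.Dict String Int) p => if d.contains p.2 then d else d.insert p.2 ((preferred.length : Int) + p.1))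
    rank0
  -- rank.__getitem__: every x in deduped is a key of rank, so the lookup never raises; getD 0 is exact here
  PySem.List.sorted deduped (fun x => rank.getD x 0) false

-- ===== PRECONDITION & SPEC =====
def Spec_order_items (items : List String) (preferred : List String) (out : List String) : Prop := out = order_items_alt items preferred
instance (items : List String) (preferred : List String) (out : List String) : Decidable (Spec_order_items items preferred out) := by unfold Spec_order_items; infer_instance

-- ===== CLAIM (what is proved, stated in full; the proofs are below) =====
def Claim_equal_order_items : Prop := ∀ (items : List String) (preferred : List String), Dom_order_items items preferred → Spec_order_items items preferred (order_items items preferred)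

-- ===== LEMMAS AND PROOFS =====

/-- Proof-only model of A's `append-if-new` pass: appends each `x` of `xs` with `c x`
that is not yet in the accumulated order `ord`. -/
def pushNew (c : String → Prop) [DecidablePred c] : List String → List String → List String
  | [], _ => []
  | x :: xs, ord => if c x ∧ ¬ x ∈ ord then x :: pushNew c xs (ord ++ [x]) else pushNew c xs ord

lemma foldl_pushNew (c : String → Prop) [DecidablePred c] (xs : List String) :
    ∀ (ord : List String) (seen : PySem.Set String), (∀ y, y ∈ seen ↔ y ∈ ord) →
    (xs.foldl (fun (st : List String × PySem.Set String) x =>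
        if c x ∧ ¬ x ∈ st.2 then (st.1 ++ [x], PySem.Set.add st.2 x) else st) (ord, seen)).1
      = ord ++ pushNew c xs ord
    ∧ ∀ y, y ∈ (xs.foldl (fun (st : List String × PySem.Set String) x =>
        if c x ∧ ¬ x ∈ st.2 then (st.1 ++ [x], PySem.Set.add st.2 x) else st) (ord, seen)).2
      ↔ y ∈ (xs.foldl (fun (st : List String × PySem.Set String) x =>
        if c x ∧ ¬ x ∈ st.2 then (st.1 ++ [x], PySem.Set.add st.2 x) else st) (ord, seen)).1 := by
  induction xs with
  | nil => intro ord seen h; simpa [pushNew] using h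
  | cons x xs ih =>
    intro ord seen h
    by_cases hc : c x ∧ ¬ x ∈ ord
    · have hcond : c x ∧ ¬ x ∈ seen := ⟨hc.1, fun hx => hc.2 ((h x).1 hx)⟩
      simp only [List.foldl_cons, if_pos hcond, pushNew, if_pos hc]
      have hinv : ∀ y, y ∈ PySem.Set.add seen x ↔ y ∈ ord ++ [x] := by
        intro y
        simp [PySem.Set.mem_add, h y]
      obtain ⟨h1, h2⟩ := ih (ord ++ [x]) (PySem.Set.add seen x) hinv
      refine ⟨?_, h2⟩
      simp [h1]
    · have hcond : ¬ (c x ∧ ¬ x ∈ seen) := by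
        intro hx
        exact hc ⟨hx.1, fun hm => hx.2 ((h x).2 hm)⟩
      simp only [List.foldl_cons, if_neg hcond, pushNew, if_neg hc]
      exact ih ord seen h

lemma filter_ext_all {l : List String} {p q : String → Bool} (h : ∀ y, p y = q y) :
    l.filter p = l.filter q :=
  List.filter_congr (fun y _ => h y)

lemma foldl_add_dedup (xs : List String) :
    ∀ (s : List String),
      xs.foldl PySem.Set.add s = s ++ (PySem.List.dedup xs).filter (fun y => decide (¬ y ∈ s)) := by
  induction xs with
  | nil => intro s; simp [PySem.List.dedup, PySem.Set.ofList]
  | cons x xs ih =>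
    intro s
    have hded : PySem.List.dedup (x :: xs) = x :: (PySem.List.dedup xs).filter (fun y => decide (¬ y = x)) := by
      have h0 : PySem.List.dedup (x :: xs) = xs.foldl PySem.Set.add [x] := by
        simp [PySem.List.dedup, PySem.Set.ofList, PySem.Set.add, PySem.Set.empty]
      rw [h0, ih [x]]
      simp
    by_cases hx : x ∈ s
    · rw [List.foldl_cons, PySem.Set.add_of_mem hx, ih s, hded]
      congr 1
      rw [List.filter_cons_of_neg (by simp [hx]), List.filter_filter]
      apply filter_ext_all
      intro y
      by_cases hy : y ∈ s
      · simp [hy]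
      · have hyx : ¬ y = x := fun h => hy (h ▸ hx)
        simp [hy, hyx]
    · rw [List.foldl_cons, PySem.Set.add_of_not_mem hx, ih (s ++ [x]), hded,
        List.filter_cons_of_pos (by simp [hx]), List.append_assoc, List.singleton_append]
      congr 2
      simp only [List.filter_filter]
      apply filter_ext_all
      intro y
      by_cases hy : y = x
      · simp [hy]
      · by_cases hs : y ∈ s <;> simp [hy, hs]

lemma dedup_cons (x : String) (xs : List String) :
    PySem.List.dedup (x :: xs) = x :: (PySem.List.dedup xs).filter (fun y => decide (¬ y = x)) := by
  have h0 : PySem.List.dedup (x :: xs) = xs.foldl PySem.Set.add [x] := by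
    simp [PySem.List.dedup, PySem.Set.ofList, PySem.Set.add, PySem.Set.empty]
  rw [h0, foldl_add_dedup xs [x]]
  simp

lemma pushNew_eq_filter (c : String → Prop) [DecidablePred c] (xs : List String) :
    ∀ (ord : List String),
      pushNew c xs ord
        = ((PySem.List.dedup xs).filter (fun y => decide (c y))).filter (fun y => decide (¬ y ∈ ord)) := by
  induction xs with
  | nil => intro ord; simp [pushNew, PySem.List.dedup, PySem.Set.ofList]
  | cons x xs ih =>
    intro ord
    rw [dedup_cons]
    by_cases hc : c x ∧ ¬ x ∈ ord
    · rw [pushNew, if_pos hc, ih (ord ++ [x]),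
        List.filter_cons_of_pos (by simp [hc.1]), List.filter_cons_of_pos (by simp [hc.2])]
      congr 1
      simp only [List.filter_filter]
      apply filter_ext_all
      intro y
      by_cases hy : y = x
      · simp [hy]
      · by_cases ho : y ∈ ord <;> by_cases hcy : c y <;> simp [hy, ho, hcy]
    · rw [pushNew, if_neg hc, ih ord]
      rcases Decidable.not_and_iff_not_or_not.mp hc with hcx | hmem
      · rw [List.filter_cons_of_neg (by simp [hcx])]
        simp only [List.filter_filter]
        apply filter_ext_all
        intro y
        by_cases hy : y = x
        · simp [hy, hcx]
        · simp [hy]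
      · have hmem' : x ∈ ord := Decidable.not_not.mp hmem
        by_cases hcx : c x
        · rw [List.filter_cons_of_pos (by simp [hcx]), List.filter_cons_of_neg (by simp [hmem'])]
          simp only [List.filter_filter]
          apply filter_ext_all
          intro y
          by_cases hy : y = x
          · simp [hy, hmem']
          · simp [hy]
        · rw [List.filter_cons_of_neg (by simp [hcx])]
          simp only [List.filter_filter]
          apply filter_ext_all
          intro y
          by_cases hy : y = x
          · simp [hy, hcx]
          · simp [hy]

lemma index?_cons_ne (xs : List String) {x y : String} (h : ¬ y = x) :
    PySem.List.index? (x :: xs) y = (PySem.List.index? xs y).map (· + 1) := by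
  simp only [PySem.List.index?_eq_idxOf?]
  rw [List.idxOf?_cons]
  simp [beq_iff_eq, Ne.symm h]

lemma index?_of_mem (xs : List String) {x : String} (h : x ∈ xs) :
    PySem.List.index? xs x = some (xs.idxOf x) := by
  simp only [PySem.List.index?_eq_idxOf?]
  induction xs with
  | nil => simp at h
  | cons a t ih =>
    rw [List.idxOf?_cons, List.idxOf_cons]
    by_cases hx : a = x
    · simp [hx]
    · have h' : x ∈ t := by simpa [Ne.symm hx] using h
      have hbeq : (a == x) = false := by simp [hx]
      simp [ih h', hbeq]

/-- A's value, in closed form: deduped preferred-and-present names, then deduped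
non-preferred items. -/
lemma order_items_closed (items preferred : List String) :
    order_items items preferred
      = (PySem.List.dedup preferred).filter (fun y => decide (y ∈ items))
        ++ (PySem.List.dedup items).filter (fun y => decide (¬ y ∈ preferred)) := by
  unfold order_items
  obtain ⟨h11, h12⟩ := foldl_pushNew (fun x => x ∈ items) preferred [] PySem.Set.empty
    (by intro y; simp [PySem.Set.empty])
  set st1 := preferred.foldl (fun (st : List String × PySem.Set String) x =>
    if x ∈ items ∧ ¬ x ∈ st.2 then (st.1 ++ [x], PySem.Set.add st.2 x) else st)
    ([], PySem.Set.empty) with hst1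
  have hfun : (fun (st : List String × PySem.Set String) x =>
      if ¬ x ∈ st.2 then (st.1 ++ [x], PySem.Set.add st.2 x) else st)
    = (fun (st : List String × PySem.Set String) x =>
      if (fun _ : String => True) x ∧ ¬ x ∈ st.2 then (st.1 ++ [x], PySem.Set.add st.2 x) else st) := by
    funext st x
    by_cases h : x ∈ st.2 <;> simp [h]
  rw [hfun]
  have hinv1 : ∀ y, y ∈ st1.2 ↔ y ∈ st1.1 := h12
  obtain ⟨h21, _⟩ := foldl_pushNew (fun _ : String => True) items st1.1 st1.2 hinv1
  have hsplit : st1 = (st1.1, st1.2) := rfl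
  rw [hsplit] at *
  rw [h21, h11]
  simp only [List.nil_append]
  have hhead : pushNew (fun x => x ∈ items) preferred []
      = (PySem.List.dedup preferred).filter (fun y => decide (y ∈ items)) := by
    rw [pushNew_eq_filter]
    simp
  rw [hhead]
  congr 1
  rw [pushNew_eq_filter]
  simp only [decide_true, List.filter_true]
  apply List.filter_congr
  intro y hy
  have hyi : y ∈ items := (PySem.List.mem_dedup items y).1 hy
  by_cases hp : y ∈ preferred
  · simp [List.mem_filter, hp, hyi]
  · simp [List.mem_filter, hp]

/-- One `if x not in d: d[x] = g(i)` loop over `enumerate(xs, s)`, looked up afterwards. -/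
lemma get?_foldl_setdefault (g : Int → Int) (x : String) (xs : List String) :
    ∀ (s : Int) (d : PySem.Dict String Int),
      ((PySem.List.enumerate xs s).foldl
          (fun (d : PySem.Dict String Int) p => if d.contains p.2 then d else d.insert p.2 (g p.1)) d).get? x
        = if d.contains x then d.get? x
          else (PySem.List.index? xs x).map (fun k => g (s + (k : Int))) := by
  induction xs with
  | nil => intro s d; by_cases h : d.contains x <;> simp [PySem.List.enumerate_nil, h, PySem.Dict.get?_eq_none_iff_contains]
  | cons y ys ih =>
    intro s d
    rw [PySem.List.enumerate_cons, List.foldl_cons]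
    by_cases hy : d.contains y
    · rw [if_pos hy, ih (s + 1) d]
      by_cases hx : d.contains x
      · simp [hx]
      · have hxy : ¬ x = y := fun h => hx (h ▸ hy)
        rw [if_neg hx, if_neg hx, index?_cons_ne ys hxy]
        cases PySem.List.index? ys x <;> simp
        ring_nf
    · rw [if_neg hy]
      rw [ih (s + 1) (d.insert y (g s))]
      by_cases hxy : x = y
      · subst hxy
        rw [if_pos (PySem.Dict.contains_insert_self d x (g s)), if_neg hy,
          PySem.Dict.get?_insert_self, PySem.List.index?_cons_self]
        simp
      · rw [PySem.Dict.contains_insert, PySem.Dict.get?_insert_of_ne d (g s) hxy]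
        have : (x == y || d.contains x) = d.contains x := by simp [hxy]
        rw [this, index?_cons_ne ys hxy]
        by_cases hx : d.contains x
        · simp [hx]
        · rw [if_neg hx, if_neg hx]
          cases PySem.List.index? ys x <;> simp
          ring_nf

/-- `dedup l` lists first occurrences in increasing first-index order. -/
lemma dedup_pairwise_idxOf (l : List String) :
    (PySem.List.dedup l).Pairwise (fun a b => l.idxOf a < l.idxOf b) := by
  induction l with
  | nil => simp [PySem.List.dedup, PySem.Set.ofList]
  | cons x xs ih =>
    rw [dedup_cons]
    refine List.Pairwise.cons ?_ ?_
    · intro b hb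
      have hbx : ¬ b = x := by
        have := (List.mem_filter.mp hb).2
        simpa using this
      rw [List.idxOf_cons_self, List.idxOf_cons_ne xs (Ne.symm hbx)]
      omega
    · have hf := List.Pairwise.filter (p := fun y => decide (¬ y = x)) ih
      refine List.Pairwise.imp_of_mem ?_ hf
      intro a b ha hb hab
      have hax : ¬ a = x := by simpa using (List.mem_filter.mp ha).2
      have hbx : ¬ b = x := by simpa using (List.mem_filter.mp hb).2
      rw [List.idxOf_cons_ne xs (Ne.symm hax), List.idxOf_cons_ne xs (Ne.symm hbx)]
      omega

lemma nodup_pairwise_idxOf (l : List String) (h : l.Nodup) :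
    l.Pairwise (fun a b => l.idxOf a < l.idxOf b) := by
  rw [List.pairwise_iff_getElem]
  intro i j hi hj hij
  rw [List.Nodup.idxOf_getElem h i hi, List.Nodup.idxOf_getElem h j hj]
  exact hij

-- ===== VERDICT (by name: the statement is the Claim_ definition above) =====
theorem order_items_spec : Claim_equal_order_items := by
  intro items preferred _
  unfold Spec_order_items order_items_alt
  rw [order_items_closed]
  set head := (PySem.List.dedup preferred).filter (fun y => decide (y ∈ items)) with hhead
  set tail := (PySem.List.dedup items).filter (fun y => decide (¬ y ∈ preferred)) with htail
  set I := PySem.List.dedup items with hI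
  set L : Int := (preferred.length : Int) with hL
  set rank0 := (PySem.List.enumerate preferred).foldl
    (fun (d : PySem.Dict String Int) p => if d.contains p.2 then d else d.insert p.2 p.1)
    PySem.Dict.empty with hrank0
  set rank := (PySem.List.enumerate I).foldl
    (fun (d : PySem.Dict String Int) p => if d.contains p.2 then d else d.insert p.2 (L + p.1))
    rank0 with hrank
  -- characterize rank0
  have h0 : ∀ x, rank0.get? x = (PySem.List.index? preferred x).map (fun k => ((0 : Int) + (k : Int))) := by
    intro x
    rw [hrank0, get?_foldl_setdefault (fun i => i) x preferred 0 PySem.Dict.empty]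
    simp [PySem.Dict.contains_empty]
  have hc0 : ∀ x, rank0.contains x = decide (x ∈ preferred) := by
    intro x
    rw [PySem.Dict.contains_eq_isSome_get?, h0 x]
    by_cases hx : x ∈ preferred
    · rw [index?_of_mem preferred hx]; simp [hx]
    · rw [PySem.List.index?_eq_idxOf?]
      have : preferred.idxOf? x = none := by
        simpa [List.idxOf?_eq_none_iff] using hx
      simp [this, hx]
  -- key values
  have hkey_pref : ∀ x, x ∈ preferred → rank.getD x 0 = (preferred.idxOf x : Int) := by
    intro x hx
    rw [PySem.Dict.getD_eq_get?_getD, hrank,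
      get?_foldl_setdefault (fun i => L + i) x I 0 rank0, hc0 x]
    simp only [hx, decide_true, if_true]
    rw [h0 x, index?_of_mem preferred hx]
    simp
  have hkey_non : ∀ x, ¬ x ∈ preferred → x ∈ I → rank.getD x 0 = L + (I.idxOf x : Int) := by
    intro x hx hxI
    rw [PySem.Dict.getD_eq_get?_getD, hrank,
      get?_foldl_setdefault (fun i => L + i) x I 0 rank0, hc0 x]
    simp only [hx, decide_false, if_false, Bool.false_eq_true]
    rw [index?_of_mem I hxI]
    simp
  -- permutation
  have hperm : (head ++ tail).Perm I := by
    have hnd : I.Nodup := by rw [hI]; exact PySem.List.nodup_dedup items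
    have h1 : head.Perm (I.filter (fun y => decide (y ∈ preferred))) := by
      refine (List.perm_ext_iff_of_nodup ?_ ?_).mpr ?_
      · exact List.Nodup.filter _ (PySem.List.nodup_dedup preferred)
      · exact List.Nodup.filter _ hnd
      · intro a
        simp [hhead, hI, List.mem_filter]
        tauto
    have h2 : (I.filter (fun y => decide (y ∈ preferred)) ++ tail).Perm I := by
      have := List.filter_append_perm (fun y => decide (y ∈ preferred)) I
      have he : I.filter (fun y => !decide (y ∈ preferred)) = tail := by
        rw [htail, hI]
        apply filter_ext_all
        intro y
        simp
      rwa [he] at this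
    exact (h1.append (List.Perm.refl tail)).trans h2
  -- strict key order along head ++ tail
  have hpw : (head ++ tail).Pairwise (fun a b => rank.getD a 0 < rank.getD b 0) := by
    rw [List.pairwise_append]
    refine ⟨?_, ?_, ?_⟩
    · have hf := List.Pairwise.filter (p := fun y => decide (y ∈ items)) (dedup_pairwise_idxOf preferred)
      refine List.Pairwise.imp_of_mem ?_ hf
      intro a b ha hb hlt
      have ha' : a ∈ preferred := (PySem.List.mem_dedup preferred a).1 (List.mem_of_mem_filter ha)
      have hb' : b ∈ preferred := (PySem.List.mem_dedup preferred b).1 (List.mem_of_mem_filter hb)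
      rw [hkey_pref a ha', hkey_pref b hb']
      exact_mod_cast hlt
    · have hnd : I.Nodup := by rw [hI]; exact PySem.List.nodup_dedup items
      have hf := List.Pairwise.filter (p := fun y => decide (¬ y ∈ preferred)) (nodup_pairwise_idxOf I hnd)
      refine List.Pairwise.imp_of_mem ?_ hf
      intro a b ha hb hlt
      have ha' : ¬ a ∈ preferred := by simpa using (List.mem_filter.mp ha).2
      have hb' : ¬ b ∈ preferred := by simpa using (List.mem_filter.mp hb).2
      rw [hkey_non a ha' (List.mem_of_mem_filter ha), hkey_non b hb' (List.mem_of_mem_filter hb)]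
      omega
    · intro a ha b hb
      have ha' : a ∈ preferred := (PySem.List.mem_dedup preferred a).1 (List.mem_of_mem_filter ha)
      have hb' : ¬ b ∈ preferred := by simpa using (List.mem_filter.mp hb).2
      rw [hkey_pref a ha', hkey_non b hb' (List.mem_of_mem_filter hb)]
      have h1 : preferred.idxOf a < preferred.length := List.idxOf_lt_length_of_mem ha'
      have h2 : (0 : Int) ≤ (I.idxOf b : Int) := Int.natCast_nonneg _
      rw [hL]
      omega
  exact (PySem.List.sorted_eq_of_perm_of_pairwise_lt I (head ++ tail) (fun x => rank.getD x 0) hperm hpw).symm
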